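-- pv_equiv track=rewrite | github.com/iagovar/openbootcamp | 99 Reto Python/1 rompeCabezas/utils.py | doesInputValidate
-- ===== SOURCE A (Python) =====
-- def doesInputValidate(array):
-- 	"""
-- 	Expects an array of arrays (lists of lists in python).
-- 	Checks if it's 3x3, has a 0, and if all numbers can be ordered sequentially.
-- 	Returns boolean.
-- 	"""
--
-- 	# We'll test for size&format first
-- 	arrayWidth = []
-- 	arrayHeight = len(array)
--
-- 	try:
-- 		for row in array:
-- 			arrayWidth.append(len(row))
-- 	except:
-- 		return False
--
-- 	for element in arrayWidth:
-- 		if element != arrayHeight: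
-- 			return False
--
-- 	# Testing for sequential order of all elements
-- 		# We first extract all elements and put em in a list
-- 	sequentialList = []
--
-- 	for row in array:
-- 		for element in row:
-- 			sequentialList.append(element)
--
-- 		# Check if it includes a zero
-- 	if 0 not in sequentialList:
-- 		return False
--
-- 	sequentialList.sort()
--
-- 		# Then we test against counter so to avoid range and len fn's
-- 	counter = 0
-- 	for element in sequentialList:
-- 		if element != counter:
-- 			return False
-- 		counter += 1
--
-- 	return True
-- ===== SOURCE B (Python) =====
-- def doesInputValidate(array):
--     n = len(array)
--     try:
--         widths = [len(row) for row in array]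
--     except TypeError:
--         return False
--     if any(w != n for w in widths):
--         return False
--     flat = [x for row in array for x in row]
--     return n > 0 and set(flat) == set(range(n * n))
-- ===== Notes on version B (the rewrite author's own statement) =====
-- stated objective: idiomatic
-- what changed: Replaces the sort-then-walk-with-a-counter sequential check (and the separate 0-membership scan) by a single set comparison: the grid is valid iff it is non-empty, square, and set(flat) == set(range(n*n)).
import Mathlib
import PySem

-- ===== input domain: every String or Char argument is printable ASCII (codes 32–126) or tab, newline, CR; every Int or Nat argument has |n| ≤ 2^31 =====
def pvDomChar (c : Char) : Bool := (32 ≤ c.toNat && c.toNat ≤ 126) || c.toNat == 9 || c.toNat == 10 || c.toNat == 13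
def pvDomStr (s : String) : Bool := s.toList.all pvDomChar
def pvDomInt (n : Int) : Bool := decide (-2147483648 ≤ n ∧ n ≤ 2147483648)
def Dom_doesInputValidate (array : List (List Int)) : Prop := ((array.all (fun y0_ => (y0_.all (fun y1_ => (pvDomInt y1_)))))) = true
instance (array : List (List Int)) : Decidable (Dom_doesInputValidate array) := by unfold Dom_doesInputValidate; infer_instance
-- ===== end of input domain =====

-- B replaces A's sort-and-count-up sequential check by one set comparison with set(range(n*n)); objective: idiomatic.

-- ===== PORT A =====
-- the counter loop: 'for element in sequentialList: if element != counter: return False; counter += 1'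
def pvCheckSeq : List Int → Int → Bool
  | [], _ => true
  | x :: xs, counter => if x ≠ counter then false else pvCheckSeq xs (counter + 1)

def doesInputValidate (array : List (List Int)) : Bool :=
  let arrayHeight : Int := (array.length : Int)
  let arrayWidth : List Int := array.foldl (fun acc row => acc ++ [(row.length : Int)]) []
  if arrayWidth.any (fun element => element ≠ arrayHeight) then false
  else
    let sequentialList : List Int :=
      array.foldl (fun acc row => row.foldl (fun a element => a ++ [element]) acc) []
    if ¬ sequentialList.contains 0 then false
    else pvCheckSeq (PySem.List.sorted sequentialList (fun x => x) false) 0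

-- ===== PORT B =====
def doesInputValidate_alt (array : List (List Int)) : Bool :=
  let n := array.length
  let widths : List Nat := array.map (fun row => row.length)
  if widths.any (fun w => w ≠ n) then false
  else
    let flat : List Int := array.flatMap (fun row => row)
    decide (0 < n) &&
      PySem.Set.equal (PySem.Set.ofList flat)
        (PySem.Set.ofList (PySem.List.pyRange 0 ((n : Int) * (n : Int)) 1))

-- ===== PRECONDITION & SPEC =====
def Spec_doesInputValidate (array : List (List Int)) (out : Bool) : Prop := out = doesInputValidate_alt array
instance (array : List (List Int)) (out : Bool) : Decidable (Spec_doesInputValidate array out) := by unfold Spec_doesInputValidate; infer_instance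

-- ===== CLAIM (what is proved, stated in full; the proofs are below) =====
def Claim_equal_doesInputValidate : Prop := ∀ (array : List (List Int)), Dom_doesInputValidate array → Spec_doesInputValidate array (doesInputValidate array)

-- ===== LEMMAS AND PROOFS =====

-- A's counter loop succeeds exactly on the list c, c+1, ..., c+(len-1)
theorem pvCheckSeq_iff (l : List Int) (c : Int) :
    pvCheckSeq l c = true ↔ l = PySem.List.pyRange c (c + l.length) 1 := by
  induction l generalizing c with
  | nil => simp [pvCheckSeq, PySem.List.pyRange_one_eq_nil (le_refl c)]
  | cons x xs ih =>
    simp only [pvCheckSeq, List.length_cons]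
    push_cast
    have hend : c + ((xs.length : Int) + 1) = (c + 1) + (xs.length : Int) := by ring
    rw [hend, PySem.List.pyRange_one_cons (by omega)]
    rcases eq_or_ne x c with hx | hx
    · subst hx
      rw [if_neg (by simp), ih]
      simp
    · rw [if_pos hx]
      simp [hx]

-- the widths of a square grid sum to n*n
theorem pv_sum_const (l : List (List Int)) (n : Nat) (h : ∀ row ∈ l, row.length = n) :
    (l.map (fun row => row.length)).sum = l.length * n := by
  induction l with
  | nil => simp
  | cons r rs ih =>
    simp only [List.map_cons, List.sum_cons, List.length_cons,
      h r (List.mem_cons_self), ih (fun row hr => h row (List.mem_cons_of_mem _ hr))]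
    ring

-- the heart of the equivalence: on a list of n*n elements, "contains 0 and sorts to
-- the consecutive run starting at 0" is the same test as "n > 0 and has the same
-- element set as range(n*n)"
theorem pv_core (flat : List Int) (n : Nat) (hlen : flat.length = n * n) :
    (if ¬ flat.contains 0 = true then false
     else pvCheckSeq (PySem.List.sorted flat (fun x => x) false) 0)
    = (decide (0 < n) && PySem.Set.equal (PySem.Set.ofList flat)
        (PySem.Set.ofList (PySem.List.pyRange 0 ((n : Int) * (n : Int)) 1))) := by
  set R : List Int := PySem.List.pyRange 0 ((n : Int) * (n : Int)) 1 with hR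
  have hcast : ((n : Int) * (n : Int)) = ((n * n : Nat) : Int) := by push_cast; ring
  have hRlen : R.length = n * n := by
    rw [hR, PySem.List.length_pyRange_one, hcast]
    exact Int.toNat_natCast _
  apply Bool.coe_iff_coe.mp
  constructor
  · intro h
    by_cases h0 : flat.contains 0 = true
    case neg =>
      rw [if_pos h0] at h
      exact absurd h (by simp)
    rw [if_neg (not_not_intro h0)] at h
    have hs := (pvCheckSeq_iff _ 0).mp h
    rw [PySem.List.length_sorted, hlen] at hs
    have hs' : PySem.List.sorted flat (fun x => x) false = R := by
      rw [hs, hR]; congr 1; rw [hcast]; ring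
    have hperm : R.Perm flat := by
      rw [← hs']; exact PySem.List.sorted_perm _ _ _
    have hn : 0 < n := by
      rcases Nat.eq_zero_or_pos n with h' | h'
      · exfalso
        have : (0 : Int) ∈ flat := List.mem_of_elem_eq_true h0
        have : flat ≠ [] := List.ne_nil_of_mem this
        have hpos : 0 < flat.length := List.length_pos_iff.mpr this
        rw [hlen, h', Nat.zero_mul] at hpos
        exact absurd hpos (by omega)
      · exact h'
    simp only [Bool.and_eq_true, decide_eq_true_eq]
    refine ⟨hn, ?_⟩
    rw [PySem.Set.equal_iff]
    intro x
    simp [PySem.Set.mem_ofList, hperm.mem_iff]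
  · intro h
    simp only [Bool.and_eq_true, decide_eq_true_eq] at h
    obtain ⟨hn, heq⟩ := h
    rw [PySem.Set.equal_iff] at heq
    have hmem : ∀ x : Int, x ∈ flat ↔ x ∈ R := by
      intro x
      have := heq x
      simpa [PySem.Set.mem_ofList] using this
    have hsub : R ⊆ flat := fun x hx => (hmem x).mpr hx
    have hnodup : R.Nodup := by rw [hR]; exact PySem.List.nodup_pyRange_one _ _
    have hsp : List.Subperm R flat := hnodup.subperm hsub
    have hperm : R.Perm flat := hsp.perm_of_length_le (by rw [hRlen, hlen])
    have hs' : PySem.List.sorted flat (fun x => x) false = R :=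
      PySem.List.sorted_eq_of_perm_of_pairwise_lt flat R (fun x => x) hperm
        (by rw [hR]; exact PySem.List.pairwise_lt_pyRange_one _ _)
    have h0R : (0 : Int) ∈ R := by
      rw [hR, PySem.List.mem_pyRange_one]
      constructor
      · rfl
      · exact_mod_cast Nat.mul_pos hn hn
    have h0 : flat.contains 0 = true := List.elem_eq_true_of_mem ((hmem 0).mpr h0R)
    rw [if_neg (not_not_intro h0), hs']
    rw [pvCheckSeq_iff, hRlen, hR]
    congr 1
    push_cast; ring

theorem pv_main (array : List (List Int)) :
    doesInputValidate array = doesInputValidate_alt array := by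
  simp only [doesInputValidate, doesInputValidate_alt]
  have hW : array.foldl (fun acc row => acc ++ [(row.length : Int)]) []
      = array.map (fun row => (row.length : Int)) := by
    rw [PySem.List.foldl_append_singleton_eq_map]; simp
  have hF : array.foldl (fun acc row => row.foldl (fun a element => a ++ [element]) acc) []
      = array.flatMap (fun row => row) := by
    simp only [PySem.List.foldl_append_singleton]
    rw [PySem.List.foldl_append_eq_flatMap]; simp
  rw [hW, hF]
  have hguard : ((array.map (fun row => (row.length : Int))).any
        (fun element => decide (element ≠ (array.length : Int))))
      = ((array.map (fun row => row.length)).any (fun w => decide (w ≠ array.length))) := by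
    simp only [List.any_map]
    congr 1
    funext row
    simp
  rw [hguard]
  by_cases hg : ((array.map (fun row => row.length)).any
      (fun w => decide (w ≠ array.length))) = true
  · rw [hg]; simp
  · rw [Bool.not_eq_true] at hg
    rw [hg]
    simp only [Bool.false_eq_true, if_false]
    have hsq : ∀ row ∈ array, row.length = array.length := by
      intro row hmem
      have := List.any_eq_false.mp hg _ (List.mem_map_of_mem hmem)
      simpa using this
    exact pv_core _ _ (by rw [List.length_flatMap, pv_sum_const array _ hsq])

-- ===== VERDICT (by name: the statement is the Claim_ definition above) =====
theorem doesInputValidate_spec : Claim_equal_doesInputValidate := by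
  intro array _
  exact pv_main array
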